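-- pv_equiv track=rewrite | github.com/tobiasriedlinger/gradient-metrics-od | faster-rcnn-torch/src/datasets/coco.py | _delete_coco_empty_category
-- ===== SOURCE A (Python) =====
-- MISSING_IDS = [12, 26, 29, 30, 45, 66, 68, 69, 71, 83, 91]
--
-- def _delete_coco_empty_category(old_id):
--     """The COCO dataset has 91 categories but 11 of them are empty.
--     This function will convert the 80 existing classes into range [0-79].
--     Note the COCO original class index starts from 1.
--     The converted index starts from 0.
--     Args:
--         old_id (int): The category ID from COCO dataset.
--     Return:
--         new_id (int): The new ID after empty categories are removed. """
--     starting_idx = 1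
--     new_id = old_id - starting_idx
--     for missing_id in MISSING_IDS:
--         if old_id > missing_id:
--             new_id -= 1
--         elif old_id == missing_id:
--             raise KeyError("illegal category ID in coco dataset! ID # is {}".format(old_id))
--         else:
--             break
--     return new_id
-- ===== SOURCE B (Python) =====
-- MISSING_IDS = [12, 26, 29, 30, 45, 66, 68, 69, 71, 83, 91]
--
-- def _delete_coco_empty_category(old_id):
--     # Binary search for the count of missing ids strictly below old_id
--     # (MISSING_IDS is sorted); raise the identical KeyError when old_id
--     # is itself a missing id.
--     lo, hi = 0, len(MISSING_IDS)
--     while lo < hi: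
--         mid = (lo + hi) // 2
--         if MISSING_IDS[mid] < old_id:
--             lo = mid + 1
--         else:
--             hi = mid
--     if lo < len(MISSING_IDS) and MISSING_IDS[lo] == old_id:
--         raise KeyError("illegal category ID in coco dataset! ID # is {}".format(old_id))
--     return old_id - 1 - lo
-- ===== Notes on version B (the rewrite author's own statement) =====
-- stated objective: alternative
-- what changed: Replaced the linear scan with early break over MISSING_IDS by a hand-rolled binary search (lower bound) yielding the count of missing ids below old_id in one step; the raise condition and message are identical.
import Mathlib
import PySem

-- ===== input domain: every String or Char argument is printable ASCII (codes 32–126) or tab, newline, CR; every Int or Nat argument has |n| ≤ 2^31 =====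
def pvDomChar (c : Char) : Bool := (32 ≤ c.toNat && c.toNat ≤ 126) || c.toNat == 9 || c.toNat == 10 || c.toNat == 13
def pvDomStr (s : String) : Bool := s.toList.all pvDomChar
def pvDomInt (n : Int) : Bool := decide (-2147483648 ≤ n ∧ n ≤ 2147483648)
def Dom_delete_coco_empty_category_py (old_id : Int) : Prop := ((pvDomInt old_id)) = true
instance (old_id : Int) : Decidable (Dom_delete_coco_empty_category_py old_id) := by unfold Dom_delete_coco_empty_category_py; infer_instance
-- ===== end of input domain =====

-- B replaces A's linear scan with early break by a binary search (lower bound) over the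
-- sorted constant MISSING_IDS; same mapping, same raise condition (alternative, not faster).

-- ===== PORT A =====
def pvMissingIds : List Int := [12, 26, 29, 30, 45, 66, 68, 69, 71, 83, 91]

-- A's for-loop with early break; the `old_id == missing_id` branch raises in Python
-- (excluded by Pre_), here it stops like the break branch.
def pvLoopA : List Int → Int → Int → Int
  | [], _, new_id => new_id
  | m :: rest, old_id, new_id =>
    if old_id > m then pvLoopA rest old_id (new_id - 1)
    else if old_id = m then new_id
    else new_id

def delete_coco_empty_category_py (old_id : Int) : Int :=
  pvLoopA pvMissingIds old_id (old_id - 1)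

-- ===== PORT B =====
-- B's while-loop lower-bound binary search, step for step.
def pvBS (old_id : Int) (lo hi : Nat) : Nat :=
  if lo < hi then
    let mid := (lo + hi) / 2
    if pvMissingIds.getD mid 0 < old_id then pvBS old_id (mid + 1) hi
    else pvBS old_id lo mid
  else lo
termination_by hi - lo
decreasing_by all_goals omega

def delete_coco_empty_category_py_alt (old_id : Int) : Int :=
  let lo := pvBS old_id 0 pvMissingIds.length
  -- Python raises here when lo < len and MISSING_IDS[lo] == old_id (excluded by Pre_)
  old_id - 1 - (lo : Int)

-- ===== PRECONDITION & SPEC =====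
-- Pre_ excludes exactly the ids in MISSING_IDS, on which both A and B raise KeyError.
def Pre_delete_coco_empty_category_py (old_id : Int) : Prop := old_id ∉ pvMissingIds
instance (old_id : Int) : Decidable (Pre_delete_coco_empty_category_py old_id) := by
  unfold Pre_delete_coco_empty_category_py; infer_instance
def pvWitness_delete_coco_empty_category_py : Int := (17)
def Spec_delete_coco_empty_category_py (old_id : Int) (out : Int) : Prop := out = delete_coco_empty_category_py_alt old_id
instance (old_id : Int) (out : Int) : Decidable (Spec_delete_coco_empty_category_py old_id out) := by unfold Spec_delete_coco_empty_category_py; infer_instance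

-- ===== CLAIM (what is proved, stated in full; the proofs are below) =====
def Claim_equal_delete_coco_empty_category_py : Prop := ∀ (old_id : Int), Dom_delete_coco_empty_category_py old_id → Pre_delete_coco_empty_category_py old_id → Spec_delete_coco_empty_category_py old_id (delete_coco_empty_category_py old_id)

-- ===== LEMMAS AND PROOFS =====

-- ===== VERDICT (by name: the statement is the Claim_ definition above) =====
set_option maxHeartbeats 1000000 in
theorem delete_coco_empty_category_py_spec : Claim_equal_delete_coco_empty_category_py := by
  intro old_id _ hpre
  unfold Spec_delete_coco_empty_category_py
  simp only [Pre_delete_coco_empty_category_py, pvMissingIds, List.mem_cons, List.not_mem_nil,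
    or_false, not_or] at hpre
  obtain ⟨h1, h2, h3, h4, h5, h6, h7, h8, h9, h10, h11⟩ := hpre
  simp [delete_coco_empty_category_py, delete_coco_empty_category_py_alt, pvLoopA, pvBS,
    pvMissingIds]
  split_ifs <;> omega
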